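-- pv_equiv track=rewrite | github.com/pali-mem/pali | research/eval_locomo_f1_bleu.py | parse_topk_values_csv
-- ===== SOURCE A (Python) =====
-- def parse_topk_values_csv(raw: str) -> list[int]:
--     values: list[int] = []
--     seen: set[int] = set()
--     for part in str(raw or "").split(","):
--         token = part.strip()
--         if not token:
--             continue
--         try:
--             value = int(token)
--         except ValueError:
--             continue
--         if value <= 0 or value in seen:
--             continue
--         seen.add(value)
--         values.append(value)
--     values.sort()
--     return values
-- ===== SOURCE B (Python) =====
-- def _pos_int_or_none(token):
--     """Parsed positive int of a stripped token, else None."""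
--     try:
--         v = int(token)
--     except ValueError:
--         return None
--     return v if v > 0 else None
--
--
-- def parse_topk_values_csv(raw: str) -> list[int]:
--     vals = sorted(
--         v
--         for part in str(raw or "").split(",")
--         if (v := _pos_int_or_none(part.strip())) is not None
--     )
--     out: list[int] = []
--     prev = None
--     for v in vals:
--         if v != prev:
--             out.append(v)
--             prev = v
--     return out
-- ===== Notes on version B (the rewrite author's own statement) =====
-- stated objective: simpler
-- what changed: B collects all valid positive ints with a filtering comprehension (no seen-set, no in-loop dedup state), sorts, and deduplicates in one pass by adjacency (skip a value equal to the previously kept one), whereas A maintains a hash set during parsing and sorts the deduplicated list.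
import Mathlib
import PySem

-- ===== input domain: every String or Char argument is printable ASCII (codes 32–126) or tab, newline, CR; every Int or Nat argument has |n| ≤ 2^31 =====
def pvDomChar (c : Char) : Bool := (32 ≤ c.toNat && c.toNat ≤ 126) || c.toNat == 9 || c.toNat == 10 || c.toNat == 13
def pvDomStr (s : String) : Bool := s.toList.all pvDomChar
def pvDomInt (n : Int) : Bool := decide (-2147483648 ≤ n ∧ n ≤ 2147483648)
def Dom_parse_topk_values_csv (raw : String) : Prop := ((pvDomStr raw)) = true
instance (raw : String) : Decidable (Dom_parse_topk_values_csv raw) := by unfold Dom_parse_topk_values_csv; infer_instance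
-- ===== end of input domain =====

-- B replaces A's in-loop seen-set dedup by a filtering comprehension, a sort, and a one-pass
-- adjacency dedup; same return value, objective: simpler.

-- ===== PORT A =====
-- A's loop: accumulate (values, seen) over the comma-split parts; skip empty tokens,
-- unparsable tokens, non-positive values and values already in seen; finally sort.
def pvStepA (st : List Int × PySem.Set Int) (part : String) : List Int × PySem.Set Int :=
  let token := PySem.Str.strip part
  if token = "" then st
  else
    match PySem.Int.ofStr? token with
    | none => st
    | some v =>
        if v ≤ 0 ∨ PySem.Set.contains st.2 v then st
        else (st.1 ++ [v], PySem.Set.add st.2 v)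

def parse_topk_values_csv (raw : String) : List Int :=
  let st := ((PySem.Str.split? raw ",").getD []).foldl pvStepA ([], PySem.Set.empty)
  PySem.List.sorted st.1 (fun x => x) false

-- ===== PORT B =====
-- helper _pos_int_or_none from Source B
def pvPosInt? (token : String) : Option Int :=
  match PySem.Int.ofStr? token with
  | none => none
  | some v => if v > 0 then some v else none

-- one-pass adjacency dedup: the out/prev loop of Source B
def pvDedupStep (st : Option Int × List Int) (v : Int) : Option Int × List Int :=
  if some v ≠ st.1 then (some v, st.2 ++ [v]) else st

def parse_topk_values_csv_alt (raw : String) : List Int :=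
  let vals := PySem.List.sorted
      (((PySem.Str.split? raw ",").getD []).filterMap (fun part => pvPosInt? (PySem.Str.strip part)))
      (fun x => x) false
  (vals.foldl pvDedupStep (none, [])).2

-- ===== PRECONDITION & SPEC =====
def Spec_parse_topk_values_csv (raw : String) (out : List Int) : Prop := out = parse_topk_values_csv_alt raw
instance (raw : String) (out : List Int) : Decidable (Spec_parse_topk_values_csv raw out) := by unfold Spec_parse_topk_values_csv; infer_instance

-- ===== CLAIM (what is proved, stated in full; the proofs are below) =====
def Claim_equal_parse_topk_values_csv : Prop := ∀ (raw : String), Dom_parse_topk_values_csv raw → Spec_parse_topk_values_csv raw (parse_topk_values_csv raw)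

-- ===== LEMMAS AND PROOFS =====

-- two strictly increasing lists of ints with the same members are equal
theorem pv_strict_sorted_ext (l1 : List Int) :
    ∀ l2 : List Int, l1.Pairwise (· < ·) → l2.Pairwise (· < ·) →
      (∀ x, x ∈ l1 ↔ x ∈ l2) → l1 = l2 := by
  induction l1 with
  | nil =>
    intro l2 h1 h2 hm
    cases l2 with
    | nil => rfl
    | cons b t2 => exact absurd ((hm b).2 List.mem_cons_self) (by simp)
  | cons a t1 ih =>
    intro l2 h1 h2 hm
    cases l2 with
    | nil => exact absurd ((hm a).1 List.mem_cons_self) (by simp)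
    | cons b t2 =>
      obtain ⟨ha1, h1'⟩ := List.pairwise_cons.1 h1
      obtain ⟨hb2, h2'⟩ := List.pairwise_cons.1 h2
      have hab : a = b := by
        have ha : a ∈ b :: t2 := (hm a).1 List.mem_cons_self
        have hb : b ∈ a :: t1 := (hm b).2 List.mem_cons_self
        rcases List.mem_cons.1 ha with h | h
        · exact h
        · rcases List.mem_cons.1 hb with h' | h'
          · exact h'.symm
          · have h3 := ha1 b h'
            have h4 := hb2 a h
            omega
      subst hab
      have htails : ∀ x, x ∈ t1 ↔ x ∈ t2 := by
        intro x
        constructor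
        · intro hx
          rcases List.mem_cons.1 ((hm x).1 (List.mem_cons_of_mem _ hx)) with h | h
          · exact absurd (ha1 x hx) (by omega)
          · exact h
        · intro hx
          rcases List.mem_cons.1 ((hm x).2 (List.mem_cons_of_mem _ hx)) with h | h
          · exact absurd (hb2 x hx) (by omega)
          · exact h
      rw [ih t2 h1' h2' htails]

set_option maxHeartbeats 1000000 in
-- A's fold (state kept as a pair (vs, vs): seen always equals values):
-- values stays Nodup and collects exactly the valid positive parsed values
theorem pvA_fold_inv (parts : List String) (vs : List Int) (hnd : vs.Nodup) :
    (parts.foldl pvStepA (vs, (vs : PySem.Set Int))).1.Nodup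
    ∧ ∀ x, x ∈ (parts.foldl pvStepA (vs, (vs : PySem.Set Int))).1 ↔
        (x ∈ vs ∨ x ∈ parts.filterMap (fun part => pvPosInt? (PySem.Str.strip part))) := by
  induction parts generalizing vs with
  | nil => simpa using hnd
  | cons p ps ih =>
    simp only [List.foldl_cons, List.filterMap_cons]
    by_cases h1 : PySem.Str.strip p = ""
    · have hstep : pvStepA (vs, (vs : PySem.Set Int)) p = (vs, vs) := by
        simp [pvStepA, h1]
      have hnone : pvPosInt? (PySem.Str.strip p) = none := by
        rw [h1]; decide
      rw [hstep, hnone]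
      exact ih vs hnd
    · cases hv : PySem.Int.ofStr? (PySem.Str.strip p) with
      | none =>
        have hstep : pvStepA (vs, (vs : PySem.Set Int)) p = (vs, vs) := by
          simp [pvStepA, h1, hv]
        have hnone : pvPosInt? (PySem.Str.strip p) = none := by
          simp [pvPosInt?, hv]
        rw [hstep, hnone]
        exact ih vs hnd
      | some v =>
        by_cases h2 : v ≤ 0
        · have hstep : pvStepA (vs, (vs : PySem.Set Int)) p = (vs, vs) := by
            simp [pvStepA, h1, hv, h2]
          have hnone : pvPosInt? (PySem.Str.strip p) = none := by
            simp [pvPosInt?, hv]; omega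
          rw [hstep, hnone]
          exact ih vs hnd
        · have hsome : pvPosInt? (PySem.Str.strip p) = some v := by
            simp [pvPosInt?, hv]; omega
          rw [hsome]
          cases hc : PySem.Set.contains (vs : PySem.Set Int) v with
          | true =>
            have hvmem : v ∈ vs := by simpa using hc
            have hstep : pvStepA (vs, (vs : PySem.Set Int)) p = (vs, vs) := by
              simp [pvStepA, h1, hv, h2, hvmem]
            rw [hstep]
            obtain ⟨hn, hm⟩ := ih vs hnd
            refine ⟨hn, fun x => ?_⟩
            rw [hm x]
            simp only [List.mem_cons]
            constructor
            · rintro (h | h)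
              · exact Or.inl h
              · exact Or.inr (Or.inr h)
            · rintro (h | h | h)
              · exact Or.inl h
              · exact Or.inl (by rw [h]; exact hvmem)
              · exact Or.inr h
          | false =>
            have hvmem : v ∉ vs := by simpa using hc
            have hadd : PySem.Set.add (vs : PySem.Set Int) v = vs ++ [v] :=
              PySem.Set.add_of_not_mem hvmem
            have hstep : pvStepA (vs, (vs : PySem.Set Int)) p = (vs ++ [v], vs ++ [v]) := by
              simp [pvStepA, h1, hv, h2, hvmem]
            rw [hstep]
            have hnd' : (vs ++ [v]).Nodup := by
              refine List.Nodup.append hnd (List.nodup_singleton v) ?_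
              intro a ha hb
              simp only [List.mem_cons, List.not_mem_nil, or_false] at hb
              subst hb
              exact hvmem ha
            obtain ⟨hn, hm⟩ := ih (vs ++ [v]) hnd'
            refine ⟨hn, fun x => ?_⟩
            rw [hm x]
            simp only [List.mem_append, List.mem_cons, List.not_mem_nil, or_false]
            exact or_assoc

-- B's dedup fold on a ≤-sorted input: result strictly increasing, members preserved
theorem pvB_fold_inv (xs : List Int) (p? : Option Int) (out : List Int)
    (hout : out.Pairwise (· < ·))
    (hle : ∀ a ∈ out, ∀ x ∈ xs, a ≤ x)
    (hxs : xs.Pairwise (· ≤ ·))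
    (hp : ∀ p, p? = some p → p ∈ out ∧ ∀ a ∈ out, a ≤ p)
    (hnone : p? = none → out = []) :
    (xs.foldl pvDedupStep (p?, out)).2.Pairwise (· < ·)
    ∧ ∀ x, x ∈ (xs.foldl pvDedupStep (p?, out)).2 ↔ (x ∈ out ∨ x ∈ xs) := by
  induction xs generalizing p? out with
  | nil => simp [hout]
  | cons v t ih =>
    obtain ⟨hv, ht⟩ := List.pairwise_cons.1 hxs
    simp only [List.foldl_cons]
    by_cases hne : some v ≠ p?
    · have hstep : pvDedupStep (p?, out) v = (some v, out ++ [v]) := by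
        simp [pvDedupStep, hne]
      rw [hstep]
      have hltv : ∀ a ∈ out, a < v := by
        intro a ha
        have hle' : a ≤ v := hle a ha v List.mem_cons_self
        rcases lt_or_eq_of_le hle' with h | h
        · exact h
        · exfalso
          subst h
          cases hp? : p? with
          | none => simp [hnone hp?] at ha
          | some p =>
            obtain ⟨hpo, hpa⟩ := hp p hp?
            have h1 : a ≤ p := hpa a ha
            have h2 : p ≤ a := hle p hpo a List.mem_cons_self
            exact hne (by rw [hp?]; congr 1; omega)
      have hout' : (out ++ [v]).Pairwise (· < ·) := by
        rw [List.pairwise_append]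
        exact ⟨hout, List.pairwise_singleton _ _, by simpa using hltv⟩
      have hle' : ∀ a ∈ out ++ [v], ∀ x ∈ t, a ≤ x := by
        intro a ha x hx
        rcases List.mem_append.1 ha with h | h
        · exact hle a h x (List.mem_cons_of_mem _ hx)
        · simp only [List.mem_singleton] at h
          exact h ▸ hv x hx
      have hp' : ∀ p, (some v : Option Int) = some p → p ∈ out ++ [v] ∧ ∀ a ∈ out ++ [v], a ≤ p := by
        intro p hpp
        cases hpp
        refine ⟨by simp, fun a ha => ?_⟩
        rcases List.mem_append.1 ha with h | h
        · exact le_of_lt (hltv a h)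
        · simp only [List.mem_singleton] at h; omega
      obtain ⟨hpw, hm⟩ := ih (some v) (out ++ [v]) hout' hle' ht hp' (by simp)
      refine ⟨hpw, fun x => ?_⟩
      rw [hm x]
      simp only [List.mem_append, List.mem_cons, List.not_mem_nil, or_false]
      tauto
    · rw [not_not] at hne
      have hstep : pvDedupStep (p?, out) v = (p?, out) := by
        simp [pvDedupStep, hne]
      rw [hstep]
      have hvmem : v ∈ out := (hp v hne.symm).1
      have hle' : ∀ a ∈ out, ∀ x ∈ t, a ≤ x :=
        fun a ha x hx => hle a ha x (List.mem_cons_of_mem _ hx)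
      obtain ⟨hpw, hm⟩ := ih p? out hout hle' ht hp hnone
      refine ⟨hpw, fun x => ?_⟩
      rw [hm x]
      simp only [List.mem_cons]
      constructor
      · rintro (h | h)
        · exact Or.inl h
        · exact Or.inr (Or.inr h)
      · rintro (h | h | h)
        · exact Or.inl h
        · exact Or.inl (h ▸ hvmem)
        · exact Or.inr h

-- ===== VERDICT (by name: the statement is the Claim_ definition above) =====
theorem parse_topk_values_csv_spec : Claim_equal_parse_topk_values_csv := by
  intro raw _
  unfold Spec_parse_topk_values_csv parse_topk_values_csv parse_topk_values_csv_alt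
  simp only [show (PySem.Set.empty : PySem.Set Int) = [] from rfl]
  set parts := (PySem.Str.split? raw ",").getD [] with hparts
  set V := parts.filterMap (fun part => pvPosInt? (PySem.Str.strip part)) with hV
  obtain ⟨hAnd, hAm⟩ := pvA_fold_inv parts [] List.nodup_nil
  -- A's side: sorted nodup list, hence strictly increasing
  set a1 := (parts.foldl pvStepA (([] : List Int), ([] : PySem.Set Int))).1 with ha1
  have hAnodup : (PySem.List.sorted a1 (fun x => x) false).Nodup :=
    (PySem.List.sorted_perm a1 (fun x => x) false).nodup_iff.2 hAnd
  have hAle : (PySem.List.sorted a1 (fun x => x) false).Pairwise (· ≤ ·) :=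
    PySem.List.sorted_pairwise a1 (fun x => x)
  have hAlt : (PySem.List.sorted a1 (fun x => x) false).Pairwise (· < ·) :=
    (hAle.and hAnodup).imp (fun h => lt_of_le_of_ne h.1 h.2)
  -- B's side: the adjacency-dedup fold of the ≤-sorted list
  set xs := PySem.List.sorted V (fun x => x) false with hxs
  have hxsle : xs.Pairwise (· ≤ ·) := PySem.List.sorted_pairwise V (fun x => x)
  obtain ⟨hBlt, hBm⟩ := pvB_fold_inv xs none []
    (List.Pairwise.nil) (by simp) hxsle (by simp) (fun _ => rfl)
  apply pv_strict_sorted_ext _ _ hAlt hBlt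
  intro x
  rw [PySem.List.mem_sorted, hAm x, hBm x]
  simp only [List.not_mem_nil, false_or]
  rw [PySem.List.mem_sorted]
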